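-- pv_equiv track=rewrite | github.com/minkyeongk/CodingTest_Algorithm | 3. 그리디/기출문제/6. 무지의 먹방 라이브 (n차 시도).py | solution
-- ===== SOURCE A (Python) =====
-- def solution(food, k):
--     if sum(food) <= k:
--         return -1
--
--     L = len(food)
--     m = k // L      # k번이 food를 돌 수 있는 최소 횟수 라고 생각
--
--     # 최소 횟수에 따른 food 처리 (m바퀴를 이미 돌았다 가정)
--     for i in range(L):
--         if food[i] <= m:
--             k -= food[i]
--             food[i] = 0
--         else:
--             k -= m
--             food[i] -= m
--
--     j = 0       # j가 먹어야할 인덱스, 즉 답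
--     while k >= 0:       # k번 돈다
--         if food[j] > 0:
--             k -= 1
--         j += 1
--         j %= L
--
--     if sum(food) <= 0:      # 다 돌았는데 다 먹었을 경우
--         return -1
--
--     return j
-- ===== SOURCE B (Python) =====
-- def solution(food, k):
--     # Closed-form: instead of simulating the post-levelling walk step by step,
--     # locate the answer by modular arithmetic over the indices still holding food.
--     if sum(food) <= k:
--         return -1
--     L = len(food)
--     m = k // L
--     rem = k - sum(f if f <= m else m for f in food)
--     pos = [i for i, f in enumerate(food) if f > m]
--     return (pos[rem % len(pos)] + 1) % L
-- ===== Notes on version B (the rewrite author's own statement) =====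
-- stated objective: alternative
-- what changed: A simulates the post-levelling walk one bite at a time (a while loop driven by the remaining count k); B computes the answer in closed form by indexing the list of still-nonempty food positions with k' mod (their count), so the step-by-step walk disappears.
import Mathlib
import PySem

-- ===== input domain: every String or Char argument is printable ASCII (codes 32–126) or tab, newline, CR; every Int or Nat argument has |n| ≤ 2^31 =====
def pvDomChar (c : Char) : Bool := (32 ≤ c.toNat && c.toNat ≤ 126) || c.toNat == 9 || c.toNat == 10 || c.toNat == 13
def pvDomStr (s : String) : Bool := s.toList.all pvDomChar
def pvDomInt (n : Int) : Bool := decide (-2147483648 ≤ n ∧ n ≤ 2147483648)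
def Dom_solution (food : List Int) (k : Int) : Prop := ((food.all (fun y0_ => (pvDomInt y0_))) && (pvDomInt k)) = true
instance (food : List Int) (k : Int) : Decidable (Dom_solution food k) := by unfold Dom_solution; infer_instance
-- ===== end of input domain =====

-- B replaces A's step-by-step post-levelling walk (a while loop taking one bite at a time) with a
-- closed-form modular lookup into the list of still-nonempty indices; A mutates `food` in place,
-- B does not — the equivalence proved here is about the RETURN value only.

-- ===== PORT A =====
-- the `while k >= 0` loop of A; `fuel` is only a totality guard (proved sufficient below)
def solLoop (fd : List Int) (L : Nat) : Nat → Int → Nat → Int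
  | 0, _, j => (j : Int)
  | fuel+1, k, j =>
    if k < 0 then (j : Int)
    else solLoop fd L fuel (if 0 < fd.getD j 0 then k - 1 else k) ((j + 1) % L)

def solution (food : List Int) (k : Int) : Int :=
  if food.sum ≤ k then -1
  else
    let L := food.length
    let m := PySem.Int.floordiv k (L : Int)
    -- the `for i in range(L)` pass, rewriting food[i] and k left to right
    let st := food.foldl
      (fun (acc : List Int × Int) f =>
        if f ≤ m then (acc.1 ++ [0], acc.2 - f) else (acc.1 ++ [f - m], acc.2 - m))
      ([], k)
    let fd := st.1
    let k1 := st.2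
    let j := solLoop fd L ((k1.toNat + 1) * (L + 1) + 1) k1 0
    if fd.sum ≤ 0 then -1 else j

-- ===== PORT B =====
def solution_alt (food : List Int) (k : Int) : Int :=
  if food.sum ≤ k then -1
  else
    let L := food.length
    let m := PySem.Int.floordiv k (L : Int)
    let rem := k - (food.map (fun f => if f ≤ m then f else m)).sum
    let pos := ((PySem.List.enumerate food 0).filter (fun q => decide (m < q.2))).map (fun q => q.1)
    let idx := PySem.Int.mod rem ((pos.length : Int))
    PySem.Int.mod ((PySem.List.pyGet? pos idx).getD 0 + 1) ((L : Nat) : Int)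

-- ===== PRECONDITION & SPEC =====
-- Pre_ excludes only food = [] with k < 0, where A raises ZeroDivisionError at k // len(food)
-- (B raises there too); on every other input A returns normally.
def Pre_solution (food : List Int) (k : Int) : Prop := food ≠ [] ∨ 0 ≤ k
instance (food : List Int) (k : Int) : Decidable (Pre_solution food k) := by
  unfold Pre_solution; infer_instance
def pvWitness_solution : List Int × Int := ([3, 1, 2], 5)

def Spec_solution (food : List Int) (k : Int) (out : Int) : Prop := out = solution_alt food k
instance (food : List Int) (k : Int) (out : Int) : Decidable (Spec_solution food k out) := by
  unfold Spec_solution; infer_instance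

-- ===== CLAIM (what is proved, stated in full; the proofs are below) =====
def Claim_equal_solution : Prop := ∀ (food : List Int) (k : Int), Dom_solution food k → Pre_solution food k → Spec_solution food k (solution food k)

-- ===== LEMMAS AND PROOFS =====

-- index (0-based) of the (r+1)-th positive entry of a list (junk if it does not exist)
def idxNth : List Int → Nat → Nat
  | [], _ => 0
  | a :: t, r =>
    if 0 < a then (if r = 0 then 0 else idxNth t (r - 1) + 1) else idxNth t r + 1

-- number of positive entries met in n cyclic steps starting at index j
def cnt (fd : List Int) (L j n : Nat) : Nat :=
  (List.range n).countP (fun i => decide (0 < fd.getD ((j + i) % L) 0))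

theorem solLoop_neg (fd : List Int) (L : Nat) (fuel : Nat) (k : Int) (j : Nat)
    (h : k < 0) : solLoop fd L fuel k j = (j : Int) := by
  cases fuel with
  | zero => rfl
  | succ f => simp [solLoop, h]

theorem cnt_mod (fd : List Int) (L j n : Nat) : cnt fd L (j % L) n = cnt fd L j n := by
  unfold cnt
  apply List.countP_congr
  intro i _
  have : (j % L + i) % L = (j + i) % L := by
    conv_lhs => rw [Nat.add_mod, Nat.mod_mod_of_dvd _ (dvd_refl L)]
    rw [← Nat.add_mod]
  simp [this]

theorem cnt_succ (fd : List Int) (L j n : Nat) (hj : j < L) :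
    cnt fd L j (n + 1)
      = (if 0 < fd.getD j 0 then 1 else 0) + cnt fd L (j + 1) n := by
  unfold cnt
  rw [List.range_succ_eq_map]
  rw [List.countP_cons, List.countP_map]
  have h0 : (j + 0) % L = j := by simp [Nat.mod_eq_of_lt hj]
  have hfun : ((fun i => decide (0 < fd.getD ((j + i) % L) 0)) ∘ (· + 1))
      = fun i => decide (0 < fd.getD ((j + 1 + i) % L) 0) := by
    funext i
    simp only [Function.comp]
    have : j + (i + 1) = j + 1 + i := by omega
    rw [this]
  rw [hfun, h0]
  show _ = _ + cnt fd L (j + 1) n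
  rw [cnt]
  by_cases h : 0 < fd.getD j 0
  · simp [h, Nat.add_comm]
  · simp [h, Nat.add_comm]

theorem solLoop_seg (fd : List Int) (L : Nat) (hL : 0 < L) :
    ∀ (n fuel : Nat) (k : Int) (j : Nat), j < L → n ≤ fuel → (cnt fd L j n : Int) ≤ k →
      solLoop fd L fuel k j = solLoop fd L (fuel - n) (k - cnt fd L j n) ((j + n) % L) := by
  intro n
  induction n with
  | zero =>
    intro fuel k j hj _ _
    simp [cnt, Nat.mod_eq_of_lt hj]
  | succ n ih =>
    intro fuel k j hj hfuel hcnt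
    have hk0 : 0 ≤ k := le_trans (by positivity) hcnt
    obtain ⟨f, rfl⟩ : ∃ f, fuel = f + 1 := ⟨fuel - 1, by omega⟩
    rw [solLoop]
    rw [if_neg (by omega)]
    have hsucc := cnt_succ fd L j n hj
    by_cases hp : 0 < fd.getD j 0
    · rw [if_pos hp]
      have hcnt' : (cnt fd L (j + 1) n : Int) ≤ k - 1 := by
        rw [hsucc] at hcnt; rw [if_pos hp] at hcnt; push_cast at hcnt ⊢; omega
      have := ih f (k - 1) ((j + 1) % L) (Nat.mod_lt _ hL) (by omega)
        (by rw [cnt_mod]; exact hcnt')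
      rw [this, cnt_mod]
      have harith : k - 1 - (cnt fd L (j + 1) n : Int) = k - (cnt fd L j (n + 1) : Int) := by
        rw [hsucc, if_pos hp]; push_cast; ring
      have hidx : ((j + 1) % L + n) % L = (j + (n + 1)) % L := by
        conv_lhs => rw [Nat.add_mod, Nat.mod_mod_of_dvd _ (dvd_refl L), ← Nat.add_mod]
        congr 1; omega
      rw [harith, hidx]
      congr 1
      omega
    · rw [if_neg hp]
      have hcnt' : (cnt fd L (j + 1) n : Int) ≤ k := by
        rw [hsucc, if_neg hp] at hcnt; push_cast at hcnt ⊢; omega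
      have := ih f k ((j + 1) % L) (Nat.mod_lt _ hL) (by omega)
        (by rw [cnt_mod]; exact hcnt')
      rw [this, cnt_mod]
      have harith : k - (cnt fd L (j + 1) n : Int) = k - (cnt fd L j (n + 1) : Int) := by
        rw [hsucc, if_neg hp]; push_cast; ring
      have hidx : ((j + 1) % L + n) % L = (j + (n + 1)) % L := by
        conv_lhs => rw [Nat.add_mod, Nat.mod_mod_of_dvd _ (dvd_refl L), ← Nat.add_mod]
        congr 1; omega
      rw [harith, hidx]
      congr 1
      omega

-- cnt over one full cycle from 0 = number of positive entries
theorem range_countP_getD (fd : List Int) :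
    (List.range fd.length).countP (fun i => decide (0 < fd.getD i 0))
      = fd.countP (fun x => decide (0 < x)) := by
  induction fd with
  | nil => simp
  | cons a t ih =>
    simp only [List.length_cons, List.range_succ_eq_map, List.countP_cons, List.countP_map]
    have : ((fun i => decide (0 < List.getD (a :: t) i 0)) ∘ (· + 1))
        = fun i => decide (0 < t.getD i 0) := by
      funext i; simp [List.getD]
    rw [this, ih]
    simp [List.getD]

theorem cnt_zero_full (fd : List Int) (hL : 0 < fd.length) :
    cnt fd fd.length 0 fd.length = fd.countP (fun x => decide (0 < x)) := by
  unfold cnt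
  rw [← range_countP_getD fd]
  apply List.countP_congr
  intro i hi
  have hi' : i < fd.length := List.mem_range.mp hi
  simp [Nat.zero_add, Nat.mod_eq_of_lt hi']

-- scanning phase: 0 ≤ k < number of positives at/after j
theorem solLoop_scan (fd : List Int) (hL : 0 < fd.length) :
    ∀ (d : Nat) (j : Nat) (k : Int) (fuel : Nat), fd.length - j ≤ d → j ≤ fd.length → 0 ≤ k →
      k.toNat < (fd.drop j).countP (fun x => decide (0 < x)) →
      fd.length - j < fuel →
      solLoop fd fd.length fuel k j
        = (((j + idxNth (fd.drop j) k.toNat + 1) % fd.length : Nat) : Int) := by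
  intro d
  induction d with
  | zero =>
    intro j k fuel hd hj _ hcount _
    have : j = fd.length := by omega
    subst this
    simp [List.drop_length] at hcount
  | succ d ih =>
    intro j k fuel hd hj hk hcount hfuel
    by_cases hjL : j = fd.length
    · subst hjL; simp [List.drop_length] at hcount
    have hjlt : j < fd.length := by omega
    have hdrop : fd.drop j = fd[j] :: fd.drop (j + 1) := List.drop_eq_getElem_cons hjlt
    have hgetD : fd.getD j 0 = fd[j] := List.getD_eq_getElem fd 0 hjlt
    obtain ⟨f, rfl⟩ : ∃ f, fuel = f + 1 := ⟨fuel - 1, by omega⟩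
    rw [solLoop, if_neg (by omega)]
    by_cases hp : 0 < fd[j]
    · rw [hgetD, if_pos hp]
      by_cases hk0 : k.toNat = 0
      · have hkz : k = 0 := by omega
        subst hkz
        rw [solLoop_neg fd fd.length f _ _ (by norm_num)]
        rw [hdrop, hk0]
        simp [idxNth, hp]
      · -- k ≥ 1
        have hcnt' : (fd.drop j).countP (fun x => decide (0 < x))
            = (fd.drop (j + 1)).countP (fun x => decide (0 < x)) + 1 := by
          rw [hdrop, List.countP_cons]; simp [hp]
        by_cases hj1 : j + 1 = fd.length
        · exfalso
          rw [hcnt'] at hcount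
          rw [hj1, List.drop_length] at hcount
          simp at hcount
          omega
        have hj1lt : j + 1 < fd.length := by omega
        have hmod : (j + 1) % fd.length = j + 1 := Nat.mod_eq_of_lt hj1lt
        rw [hmod]
        rw [hcnt'] at hcount
        rw [ih (j + 1) (k - 1) f (by omega) (by omega) (by omega) (by omega) (by omega)]
        rw [hdrop]
        have hidx : idxNth (fd[j] :: fd.drop (j + 1)) k.toNat
            = idxNth (fd.drop (j + 1)) ((k - 1).toNat) + 1 := by
          rw [idxNth]
          rw [if_pos hp, if_neg hk0]
          congr 2
          omega
        rw [hidx]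
        have harg : j + 1 + (idxNth (fd.drop (j + 1)) (k - 1).toNat + 1)
            = j + (idxNth (fd.drop (j + 1)) (k - 1).toNat + 1) + 1 := by omega
        rw [Nat.add_assoc, harg]
    · rw [hgetD, if_neg hp]
      have hcnt' : (fd.drop j).countP (fun x => decide (0 < x))
          = (fd.drop (j + 1)).countP (fun x => decide (0 < x)) := by
        rw [hdrop, List.countP_cons]; simp [hp]
      by_cases hj1 : j + 1 = fd.length
      · exfalso
        rw [hcnt', hj1, List.drop_length] at hcount
        simp at hcount
      have hj1lt : j + 1 < fd.length := by omega
      rw [Nat.mod_eq_of_lt hj1lt]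
      rw [hcnt'] at hcount
      rw [ih (j + 1) k f (by omega) (by omega) hk hcount (by omega)]
      rw [hdrop]
      have hidx : idxNth (fd[j] :: fd.drop (j + 1)) k.toNat
          = idxNth (fd.drop (j + 1)) k.toNat + 1 := by
        rw [idxNth, if_neg hp]
      rw [hidx]
      have harg : j + 1 + (idxNth (fd.drop (j + 1)) k.toNat + 1)
          = j + (idxNth (fd.drop (j + 1)) k.toNat + 1) + 1 := by omega
      rw [Nat.add_assoc, harg]

-- main loop characterization: from j = 0, enough fuel
theorem solLoop_main (fd : List Int) (hL : 0 < fd.length)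
    (hp : 0 < fd.countP (fun x => decide (0 < x))) :
    ∀ (K : Nat) (k : Int) (fuel : Nat), 0 ≤ k → k.toNat = K →
      (K + 1) * fd.length + 1 ≤ fuel →
      solLoop fd fd.length fuel k 0
        = (((idxNth fd (k.toNat % fd.countP (fun x => decide (0 < x))) + 1) % fd.length : Nat) : Int) := by
  intro K
  induction K using Nat.strong_induction_on with
  | _ K ihK =>
  intro k fuel hk hK hfuel
  by_cases hlt : k.toNat < fd.countP (fun x => decide (0 < x))
  · rw [Nat.mod_eq_of_lt hlt]
    have := solLoop_scan fd hL fd.length 0 k fuel (by omega) (by omega) hk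
      (by rw [List.drop_zero]; exact hlt)
      (by have h3 : (K + 1) * fd.length = K * fd.length + fd.length := by ring
          omega)
    rw [this, List.drop_zero, Nat.zero_add]
  · have hPle : (fd.countP (fun x => decide (0 < x)) : Int) ≤ k := by omega
    have hseg := solLoop_seg fd fd.length hL fd.length fuel k 0 hL
      (by have h3 : (K + 1) * fd.length = K * fd.length + fd.length := by ring
          omega)
      (by rw [cnt_zero_full fd hL]; exact hPle)
    rw [cnt_zero_full fd hL] at hseg
    rw [show (0 + fd.length) % fd.length = 0 from by simp] at hseg
    rw [hseg]
    have hK' : (k - (fd.countP (fun x => decide (0 < x)) : Int)).toNat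
        = K - fd.countP (fun x => decide (0 < x)) := by omega
    have hfuel' : ((K - fd.countP (fun x => decide (0 < x))) + 1) * fd.length + 1
        ≤ fuel - fd.length := by
      have h1 : (K - fd.countP (fun x => decide (0 < x))) + 1 ≤ K := by omega
      have h2 : ((K - fd.countP (fun x => decide (0 < x))) + 1) * fd.length
          ≤ K * fd.length := Nat.mul_le_mul_right _ h1
      have h3 : (K + 1) * fd.length = K * fd.length + fd.length := by ring
      omega
    rw [ihK (K - fd.countP (fun x => decide (0 < x))) (by omega)
      (k - (fd.countP (fun x => decide (0 < x)) : Int)) (fuel - fd.length)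
      (by omega) hK' hfuel']
    rw [hK']
    have hmodeq : (K - fd.countP (fun x => decide (0 < x))) % fd.countP (fun x => decide (0 < x))
        = k.toNat % fd.countP (fun x => decide (0 < x)) := by
      rw [Nat.mod_eq_sub_mod (by omega : fd.countP (fun x => decide (0 < x)) ≤ k.toNat), hK]
    rw [hmodeq]

-- the levelling pass as a fold
theorem fold_phase (m : Int) :
    ∀ (l : List Int) (acc : List Int × Int),
      l.foldl (fun (acc : List Int × Int) f =>
          if f ≤ m then (acc.1 ++ [0], acc.2 - f) else (acc.1 ++ [f - m], acc.2 - m)) acc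
        = (acc.1 ++ l.map (fun f => if f ≤ m then 0 else f - m),
           acc.2 - (l.map (fun f => if f ≤ m then f else m)).sum) := by
  intro l
  induction l with
  | nil => intro acc; simp
  | cons a t ih =>
    intro acc
    by_cases h : a ≤ m <;> simp [h, ih] <;> ring

theorem sum_map_min_le (m : Int) (l : List Int) :
    (l.map (fun f => if f ≤ m then f else m)).sum ≤ l.length * m := by
  induction l with
  | nil => simp
  | cons a t ih =>
    simp only [List.map_cons, List.sum_cons, List.length_cons]
    have : (↑(t.length + 1) : Int) * m = t.length * m + m := by push_cast; ring
    rw [this]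
    split_ifs with h <;> omega

theorem sum_pos_of_mem (l : List Int) (hnn : ∀ x ∈ l, 0 ≤ x) (x : Int) (hx : x ∈ l)
    (hpos : 0 < x) : 0 < l.sum := by
  induction l with
  | nil => simp at hx
  | cons a t ih =>
    simp only [List.sum_cons]
    rcases List.mem_cons.mp hx with rfl | hx'
    · have : 0 ≤ t.sum := List.sum_nonneg (fun y hy => hnn y (List.mem_cons_of_mem _ hy))
      omega
    · have : 0 ≤ a := hnn a (List.mem_cons_self)
      have := ih (fun y hy => hnn y (List.mem_cons_of_mem _ hy)) hx'
      omega

-- B's pos list: r-th element is the index of the (r+1)-th entry > m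
theorem pos_get (m : Int) :
    ∀ (l : List Int) (s : Int) (r : Nat), r < l.countP (fun x => decide (m < x)) →
      (((PySem.List.enumerate l s).filter (fun q => decide (m < q.2))).map (fun q => q.1))[r]?
        = some (s + (idxNth (l.map (fun f => if f ≤ m then 0 else f - m)) r : Int)) := by
  intro l
  induction l with
  | nil => intro s r hr; simp at hr
  | cons a t ih =>
    intro s r hr
    rw [PySem.List.enumerate_cons]
    rw [List.countP_cons] at hr
    by_cases hma : m < a
    · have hga : ¬ a ≤ m := by omega
      rw [List.filter_cons_of_pos (by simp [hma])]
      cases r with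
      | zero =>
        simp [idxNth, hga, hma]
      | succ r =>
        rw [List.map_cons, List.getElem?_cons_succ]
        rw [ih (s + 1) r (by simp [hma] at hr; omega)]
        have : idxNth (List.map (fun f => if f ≤ m then 0 else f - m) (a :: t)) (r + 1)
            = idxNth (List.map (fun f => if f ≤ m then 0 else f - m) t) r + 1 := by
          rw [List.map_cons, idxNth, if_neg hga, if_pos (by omega : (0:Int) < a - m)]
          simp
        rw [this]
        simp only [Option.some.injEq]
        push_cast
        ring
    · have hga : a ≤ m := by omega
      rw [List.filter_cons_of_neg (by simp [hma])]
      rw [ih (s + 1) r (by simp [hma] at hr; omega)]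
      have : idxNth (List.map (fun f => if f ≤ m then 0 else f - m) (a :: t)) r
          = idxNth (List.map (fun f => if f ≤ m then 0 else f - m) t) r + 1 := by
        rw [List.map_cons, idxNth, if_pos hga]
        simp
      rw [this]
      simp only [Option.some.injEq]
      push_cast
      ring

theorem pos_length (m : Int) :
    ∀ (l : List Int) (s : Int),
      (((PySem.List.enumerate l s).filter (fun q => decide (m < q.2))).map (fun q => q.1)).length
        = l.countP (fun x => decide (m < x)) := by
  intro l
  induction l with
  | nil => intro s; simp [PySem.List.enumerate_nil]
  | cons a t ih =>
    intro s
    rw [PySem.List.enumerate_cons, List.countP_cons]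
    by_cases h : m < a <;> simp [h, ih (s + 1)]

theorem countP_map_pos (m : Int) (l : List Int) :
    (l.map (fun f => if f ≤ m then 0 else f - m)).countP (fun x => decide (0 < x))
      = l.countP (fun x => decide (m < x)) := by
  rw [List.countP_map]
  apply List.countP_congr
  intro x _
  simp only [Function.comp]
  split_ifs with h <;> simp <;> omega

-- ===== VERDICT (by name: the statement is the Claim_ definition above) =====
-- every entry of the levelled list is nonnegative
theorem map_g_nonneg (m : Int) (l : List Int) :
    ∀ x ∈ l.map (fun f => if f ≤ m then 0 else f - m), 0 ≤ x := by
  intro x hx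
  obtain ⟨f, _, rfl⟩ := List.mem_map.mp hx
  split_ifs with h <;> omega

theorem solution_eq (food : List Int) (k : Int) (hpre : Pre_solution food k) :
    solution food k = solution_alt food k := by
  by_cases hsum : food.sum ≤ k
  · simp [solution, solution_alt, hsum]
  have hLpos : 0 < food.length := by
    cases food with
    | nil =>
      exfalso
      rcases hpre with h | h
      · exact h rfl
      · exact hsum (by simpa using h)
    | cons a t => simp
  rw [solution, solution_alt, if_neg hsum, if_neg hsum]
  simp only []
  rw [fold_phase]
  simp only [List.nil_append]
  set L : Nat := food.length with hLdef
  set m : Int := PySem.Int.floordiv k (L : Int) with hmdef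
  set g : Int → Int := fun f => if f ≤ m then 0 else f - m with hgdef
  set hfun : Int → Int := fun f => if f ≤ m then f else m with hhdef
  set fd : List Int := food.map g with hfddef
  set rem : Int := k - (food.map hfun).sum with hremdef
  -- m = k / L (floor = euclidean for a positive divisor), so L * m ≤ k
  have hLint : (0 : Int) < (L : Int) := by exact_mod_cast hLpos
  have hmval : m = k / (L : Int) := PySem.Int.floordiv_eq_ediv_of_pos hLint
  have hLm : (L : Int) * m ≤ k := by
    rw [hmval]
    have := Int.emod_nonneg k (by omega : (L : Int) ≠ 0)
    have := Int.ediv_add_emod k (L : Int)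
    omega
  have hrem0 : 0 ≤ rem := by
    have h1 := sum_map_min_le m food
    rw [hremdef]
    rw [← hhdef] at h1
    rw [← hLdef] at h1
    omega
  set P : Nat := food.countP (fun x => decide (m < x)) with hPdef
  have hP : 0 < P := by
    by_contra hP0
    have h0 : P = 0 := by omega
    rw [hPdef] at h0
    have hall : ∀ f ∈ food, ¬ m < f := by
      intro f hf
      have := List.countP_eq_zero.mp h0 f hf
      simpa using this
    have hmapid : food.map hfun = food := by
      conv_rhs => rw [← List.map_id food]
      apply List.map_congr_left
      intro f hf
      rw [hhdef]
      simp only [id]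
      rw [if_pos (by have := hall f hf; omega)]
    have hsums : (food.map hfun).sum = food.sum := by rw [hmapid]
    rw [hremdef] at hrem0
    omega
  have hfdlen : fd.length = L := by rw [hfddef, List.length_map]
  have hfdP : fd.countP (fun x => decide (0 < x)) = P := by
    rw [hfddef, hgdef, hPdef]; exact countP_map_pos m food
  have hfdpos : 0 < fd.countP (fun x => decide (0 < x)) := by omega
  -- the final `sum(food) <= 0` branch of A is never taken here
  have hfdsum : ¬ fd.sum ≤ 0 := by
    obtain ⟨a, ha, hap⟩ := List.countP_pos_iff.mp hfdpos
    have hap' : 0 < a := by simpa using hap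
    have := sum_pos_of_mem fd (by rw [hfddef, hgdef]; exact map_g_nonneg m food) a ha hap'
    omega
  -- A's while loop, in closed form
  set r : Nat := rem.toNat % P with hrdef
  have hrP : r < P := Nat.mod_lt _ hP
  have hA : solLoop fd L ((rem.toNat + 1) * (L + 1) + 1) rem 0
      = (((idxNth fd r + 1) % L : Nat) : Int) := by
    rw [← hfdlen]
    rw [solLoop_main fd (by omega) hfdpos rem.toNat rem _ hrem0 rfl
      (by have := Nat.mul_le_mul_left (rem.toNat + 1) (by omega : fd.length ≤ fd.length + 1)
          omega)]
    rw [hfdP, hfdlen]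
  rw [hA, if_neg hfdsum]
  -- B's closed form evaluates to the same index
  have hposlen : (((PySem.List.enumerate food 0).filter (fun q => decide (m < q.2))).map
      (fun q => q.1)).length = P := by rw [hPdef]; exact pos_length m food 0
  rw [hposlen]
  have hidx : PySem.Int.mod rem (P : Int) = ((r : Nat) : Int) := by
    rw [PySem.Int.mod_eq_emod_of_pos (by exact_mod_cast hP)]
    rw [hrdef]
    have : rem = ((rem.toNat : Nat) : Int) := by omega
    rw [this]
    exact_mod_cast Int.ofNat_mod_ofNat rem.toNat P
  rw [hidx]
  rw [PySem.List.pyGet?_natCast]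
  rw [pos_get m food 0 r (by rw [← hPdef]; exact hrP)]
  rw [← hgdef, ← hfddef]
  simp only [Option.getD_some]
  rw [PySem.Int.mod_eq_emod_of_pos hLint]
  have hcast : (0 : Int) + (idxNth fd r : Int) + 1 = ((idxNth fd r + 1 : Nat) : Int) := by
    push_cast; ring
  rw [hcast]
  exact_mod_cast (Int.ofNat_mod_ofNat (idxNth fd r + 1) L).symm

-- ===== final verdict =====
theorem solution_spec : Claim_equal_solution := by
  intro food k _ hpre
  exact solution_eq food k hpre
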